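-- pv_equiv track=rewrite | github.com/phakphoum38-stack/hackintosh-ai | backend/builder/config_gen.py | sort_kexts
-- ===== SOURCE A (Python) =====
-- def sort_kexts(kexts):
--     priority = [
--         "Lilu.kext",
--         "VirtualSMC.kext",
--         "SMCProcessor.kext",
--         "SMCSuperIO.kext",
--         "SMCBatteryManager.kext",
--         "WhateverGreen.kext",
--         "AppleALC.kext"
--     ]
--
--     ordered = []
--
--     for p in priority:
--         if p in kexts:
--             ordered.append(p)
--
--     for k in kexts:
--         if k not in ordered:
--             ordered.append(k)
--
--     return ordered
-- ===== SOURCE B (Python) =====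
-- def sort_kexts(kexts):
--     priority = [
--         "Lilu.kext",
--         "VirtualSMC.kext",
--         "SMCProcessor.kext",
--         "SMCSuperIO.kext",
--         "SMCBatteryManager.kext",
--         "WhateverGreen.kext",
--         "AppleALC.kext"
--     ]
--     rank = {name: i for i, name in enumerate(priority)}
--     unique = list(dict.fromkeys(kexts))
--     return sorted(unique, key=lambda k: rank.get(k, len(priority)))
-- ===== Notes on version B (the rewrite author's own statement) =====
-- stated objective: faster
-- what changed: Replaces A's two filtering passes with O(n) membership tests in the growing output list by a rank dict, an order-preserving dedup via dict.fromkeys, and a single stable sort keyed on the rank (unknown kexts keyed last, keeping their original relative order).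
import Mathlib
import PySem

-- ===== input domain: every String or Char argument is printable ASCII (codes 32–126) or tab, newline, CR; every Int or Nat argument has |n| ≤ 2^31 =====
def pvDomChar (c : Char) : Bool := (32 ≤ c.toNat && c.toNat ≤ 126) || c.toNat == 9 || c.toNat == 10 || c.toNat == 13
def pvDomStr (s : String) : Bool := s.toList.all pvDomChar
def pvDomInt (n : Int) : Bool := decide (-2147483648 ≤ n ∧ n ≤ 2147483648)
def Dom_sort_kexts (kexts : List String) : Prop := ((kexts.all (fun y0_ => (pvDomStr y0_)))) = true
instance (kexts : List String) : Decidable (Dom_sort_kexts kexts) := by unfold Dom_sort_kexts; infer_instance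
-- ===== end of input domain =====

-- B replaces A's two filtering passes (with membership tests in the growing output) by a rank
-- dict, an order-preserving dedup, and one stable sort keyed on the rank: a simpler single-sort
-- formulation of the same result.

-- ===== PORT A =====
def sort_kexts (kexts : List String) : List String :=
  let priority : List String :=
    ["Lilu.kext", "VirtualSMC.kext", "SMCProcessor.kext", "SMCSuperIO.kext",
     "SMCBatteryManager.kext", "WhateverGreen.kext", "AppleALC.kext"]
  -- ordered = []; for p in priority: if p in kexts: ordered.append(p)
  let ordered := priority.foldl (fun acc p => if p ∈ kexts then acc ++ [p] else acc) []
  -- for k in kexts: if k not in ordered: ordered.append(k)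
  kexts.foldl (fun acc k => if k ∉ acc then acc ++ [k] else acc) ordered

-- ===== PORT B =====
def sort_kexts_alt (kexts : List String) : List String :=
  let priority : List String :=
    ["Lilu.kext", "VirtualSMC.kext", "SMCProcessor.kext", "SMCSuperIO.kext",
     "SMCBatteryManager.kext", "WhateverGreen.kext", "AppleALC.kext"]
  -- rank = {name: i for i, name in enumerate(priority)}
  let rank : PySem.Dict String Int :=
    (PySem.List.enumerate priority).foldl (fun d p => d.insert p.2 p.1) PySem.Dict.empty
  -- unique = list(dict.fromkeys(kexts))
  let unique := PySem.List.dedup kexts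
  -- sorted(unique, key=lambda k: rank.get(k, len(priority)))
  PySem.List.sorted unique (fun k => rank.getD k (priority.length : Int)) false

-- ===== PRECONDITION & SPEC =====
def Spec_sort_kexts (kexts : List String) (out : List String) : Prop := out = sort_kexts_alt kexts
instance (kexts : List String) (out : List String) : Decidable (Spec_sort_kexts kexts out) := by unfold Spec_sort_kexts; infer_instance

-- ===== CLAIM (what is proved, stated in full; the proofs are below) =====
def Claim_equal_sort_kexts : Prop := ∀ (kexts : List String), Dom_sort_kexts kexts → Spec_sort_kexts kexts (sort_kexts kexts)

-- ===== LEMMAS AND PROOFS =====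

-- The fixed priority list (proof-side name for the literal both ports carry).
def prL : List String :=
  ["Lilu.kext", "VirtualSMC.kext", "SMCProcessor.kext", "SMCSuperIO.kext",
   "SMCBatteryManager.kext", "WhateverGreen.kext", "AppleALC.kext"]

-- B's sort key: the rank of a priority name, 7 for everything else.
def keyB (k : String) : Int :=
  PySem.Dict.getD ((PySem.List.enumerate prL).foldl (fun d p => d.insert p.2 p.1) PySem.Dict.empty) k 7

-- The common shape both programs reach after a duplicate-free prefix p has been processed:
-- the priority names occurring in p (in priority order), then p's other names in p's order.
def Tgt (p : List String) : List String :=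
  prL.filter (fun q => decide (q ∈ p)) ++ p.filter (fun x => decide (x ∉ prL))

lemma keyB_of_not_mem {x : String} (h : x ∉ prL) : keyB x = 7 := by
  simp [prL] at h
  obtain ⟨h1, h2, h3, h4, h5, h6, h7⟩ := h
  simp [keyB, prL, PySem.List.enumerate, PySem.Dict.getD_insert, PySem.Dict.getD_empty,
    h1, h2, h3, h4, h5, h6, h7]

lemma keyB_lt_of_mem {x : String} (h : x ∈ prL) : keyB x < 7 := by
  simp [prL] at h
  rcases h with h | h | h | h | h | h | h <;> subst h <;> decide

lemma prL_pairwise_key : prL.Pairwise (fun a b => keyB a < keyB b) := by decide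

lemma prL_nodup : prL.Nodup := by decide

lemma insertBy_append_right {α : Type} (b : α → α → Bool) (x : α) (l1 l2 : List α)
    (h : ∀ y ∈ l2, b x y = true) :
    PySem.List.insertBy b x (l1 ++ l2) = PySem.List.insertBy b x l1 ++ l2 := by
  induction l1 with
  | nil =>
    cases l2 with
    | nil => rfl
    | cons y ys => simp [PySem.List.insertBy, h y (by simp)]
  | cons a l1 ih =>
    simp only [List.cons_append, PySem.List.insertBy]
    split <;> simp [ih]

lemma filter_mem_append_perm (pr : List String) (p : List String) (x : String)
    (hnd : pr.Nodup) (hx : x ∈ pr) (hxp : x ∉ p) :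
    (pr.filter (fun q => decide (q ∈ p ++ [x]))).Perm (x :: pr.filter (fun q => decide (q ∈ p))) := by
  induction pr with
  | nil => simp at hx
  | cons a pr ih =>
    rcases List.nodup_cons.mp hnd with ⟨hap, hnd'⟩
    by_cases hax : x = a
    · subst hax
      have heq : (pr.filter (fun q => decide (q ∈ p ++ [x]))) = pr.filter (fun q => decide (q ∈ p)) :=
        List.filter_congr (fun q hq => by
          have : q ≠ x := fun e => hap (e ▸ hq)
          simp [this])
      rw [List.filter_cons_of_pos (by simp), List.filter_cons_of_neg (by simp [hxp]), heq]
    · have hx' : x ∈ pr := by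
        rcases List.mem_cons.mp hx with h | h
        · exact absurd h hax
        · exact h
      by_cases hap' : a ∈ p
      · rw [List.filter_cons_of_pos (by simp [hap']), List.filter_cons_of_pos (by simp [hap'])]
        exact ((ih hnd' hx').cons a).trans (List.Perm.swap x a _)
      · rw [List.filter_cons_of_neg (by simp [hap', Ne.symm hax]), List.filter_cons_of_neg (by simp [hap'])]
        exact ih hnd' hx'

-- A's second loop, relative to the already-built priority block: skipping duplicates and
-- priority names that are already present.
lemma A_loop2 (K : List String) : ∀ (xs acc : List String), (∀ y ∈ acc, y ∉ prL) → (∀ x ∈ xs, x ∈ K) →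
    xs.foldl (fun a k => if k ∉ a then a ++ [k] else a) (prL.filter (fun q => decide (q ∈ K)) ++ acc)
      = prL.filter (fun q => decide (q ∈ K))
        ++ xs.foldl (fun a x => if x ∈ prL ∨ x ∈ a then a else a ++ [x]) acc := by
  intro xs
  induction xs with
  | nil => intro acc _ _; rfl
  | cons x xs ih =>
    intro acc hacc hsub
    have hxK : x ∈ K := hsub x (by simp)
    by_cases hpr : x ∈ prL
    · have hmem : x ∈ prL.filter (fun q => decide (q ∈ K)) ++ acc := by
        simp [List.mem_filter, hpr, hxK]
      simp only [List.foldl_cons, if_neg (not_not_intro hmem), if_pos (Or.inl hpr)]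
      exact ih acc hacc (fun y hy => hsub y (by simp [hy]))
    · have hiff : (x ∈ prL.filter (fun q => decide (q ∈ K)) ++ acc) ↔ x ∈ acc := by
        simp [List.mem_filter, hpr]
      by_cases hacc' : x ∈ acc
      · simp only [List.foldl_cons, if_neg (not_not_intro (hiff.mpr hacc')), if_pos (Or.inr hacc')]
        exact ih acc hacc (fun y hy => hsub y (by simp [hy]))
      · have hnm : x ∉ prL.filter (fun q => decide (q ∈ K)) ++ acc := fun h => hacc' (hiff.mp h)
        simp only [List.foldl_cons, if_pos hnm, if_neg (by simp [hpr, hacc'] : ¬(x ∈ prL ∨ x ∈ acc))]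
        rw [List.append_assoc]
        exact ih (acc ++ [x]) (fun y hy => by
          rcases List.mem_append.mp hy with h | h
          · exact hacc y h
          · simp at h; subst h; exact hpr) (fun y hy => hsub y (by simp [hy]))

-- The non-priority part of that loop is dedup followed by a filter.
lemma dd_filter : ∀ (xs s : List String),
    xs.foldl (fun a x => if x ∈ prL ∨ x ∈ a then a else a ++ [x]) (s.filter (fun x => decide (x ∉ prL)))
      = (xs.foldl PySem.Set.add s).filter (fun x => decide (x ∉ prL)) := by
  intro xs
  induction xs with
  | nil => intro s; rfl
  | cons x xs ih =>
    intro s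
    have hadd : ∀ (t : List String), PySem.Set.add t x = if x ∈ t then t else t ++ [x] := by
      intro t
      simp [PySem.Set.add, PySem.Set.contains]
    by_cases hpr : x ∈ prL
    · have : (PySem.Set.add s x).filter (fun x => decide (x ∉ prL)) = s.filter (fun x => decide (x ∉ prL)) := by
        rw [hadd]; split
        · rfl
        · simp [List.filter_append, hpr]
      simp only [List.foldl_cons, if_pos (Or.inl hpr)]
      rw [← this]
      exact ih (PySem.Set.add s x)
    · by_cases hs : x ∈ s
      · have hm : x ∈ s.filter (fun x => decide (x ∉ prL)) := by simp [List.mem_filter, hs, hpr]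
        simp only [List.foldl_cons, if_pos (Or.inr hm)]
        rw [hadd, if_pos hs]
        exact ih s
      · have hm : ¬(x ∈ prL ∨ x ∈ s.filter (fun x => decide (x ∉ prL))) := by
          simp [List.mem_filter, hpr, hs]
        simp only [List.foldl_cons, if_neg hm]
        rw [hadd, if_neg hs]
        have : s.filter (fun x => decide (x ∉ prL)) ++ [x] = (s ++ [x]).filter (fun x => decide (x ∉ prL)) := by
          simp [List.filter_append, hpr]
        rw [this]
        exact ih (s ++ [x])

lemma A_char (kexts : List String) :
    sort_kexts kexts
      = prL.filter (fun q => decide (q ∈ kexts))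
        ++ (PySem.List.dedup kexts).filter (fun x => decide (x ∉ prL)) := by
  show kexts.foldl _ (prL.foldl (fun acc p => if p ∈ kexts then acc ++ [p] else acc) []) = _
  rw [PySem.List.foldl_append_ite_eq_filter, List.nil_append]
  have h1 := A_loop2 kexts kexts [] (by simp) (fun x hx => hx)
  rw [List.append_nil] at h1
  have h2 := dd_filter kexts []
  simp only [List.filter_nil] at h2
  rw [h1, h2]
  rfl

-- One insertion-sort step on the common shape.
lemma ins_step (p : List String) (x : String) (hx : x ∉ p) :
    PySem.List.insertBy (fun a b => decide (keyB a < keyB b)) x (Tgt p) = Tgt (p ++ [x]) := by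
  by_cases hpr : x ∈ prL
  · -- a priority kext lands inside the (strictly key-sorted) priority block
    have hA2 : ∀ y ∈ p.filter (fun x => decide (x ∉ prL)), (decide (keyB x < keyB y)) = true := by
      intro y hy
      have : y ∉ prL := by simpa using (List.mem_filter.mp hy).2
      simp [keyB_of_not_mem this]
      exact keyB_lt_of_mem hpr
    have h1 : PySem.List.insertBy (fun a b => decide (keyB a < keyB b)) x (Tgt p)
        = PySem.List.insertBy (fun a b => decide (keyB a < keyB b)) x (prL.filter (fun q => decide (q ∈ p)))
          ++ p.filter (fun x => decide (x ∉ prL)) :=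
      insertBy_append_right _ x _ _ hA2
    have hpair : (prL.filter (fun q => decide (q ∈ p))).Pairwise (fun a b => keyB a < keyB b) :=
      prL_pairwise_key.filter _
    have h2 : PySem.List.insertBy (fun a b => decide (keyB a < keyB b)) x (prL.filter (fun q => decide (q ∈ p)))
        = PySem.List.sorted (prL.filter (fun q => decide (q ∈ p)) ++ [x]) keyB := by
      rw [PySem.List.sorted_eq_foldl_insertBy, List.foldl_append, List.foldl_cons, List.foldl_nil,
        ← PySem.List.sorted_eq_foldl_insertBy,
        PySem.List.sorted_eq_self_of_pairwise _ _ (hpair.imp le_of_lt)]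
    have h3 : PySem.List.sorted (prL.filter (fun q => decide (q ∈ p)) ++ [x]) keyB
        = prL.filter (fun q => decide (q ∈ p ++ [x])) := by
      apply PySem.List.sorted_eq_of_perm_of_pairwise_lt
      · exact (filter_mem_append_perm prL p x prL_nodup hpr hx).trans
          (List.perm_append_singleton x _).symm
      · exact prL_pairwise_key.filter _
    have h4 : (p ++ [x]).filter (fun x => decide (x ∉ prL)) = p.filter (fun x => decide (x ∉ prL)) := by
      simp [List.filter_append, hpr]
    rw [h1, h2, h3, Tgt, h4]
  · -- a non-priority kext has key 7 = the maximum, so it is appended at the end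
    have hall : ∀ y ∈ Tgt p, (decide (keyB x < keyB y)) = false := by
      intro y hy
      rw [keyB_of_not_mem hpr]
      rcases List.mem_append.mp hy with h | h
      · have h1 := keyB_lt_of_mem (List.mem_filter.mp h).1
        simp
        omega
      · have h1 : y ∉ prL := by simpa using (List.mem_filter.mp h).2
        simp [keyB_of_not_mem h1]
    rw [PySem.List.insertBy_of_forall_not_before _ _ _ hall]
    unfold Tgt
    have hA1 : prL.filter (fun q => decide (q ∈ p ++ [x])) = prL.filter (fun q => decide (q ∈ p)) :=
      List.filter_congr (fun q hq => by
        have : q ≠ x := fun e => hpr (e ▸ hq)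
        simp [this])
    rw [hA1, List.filter_append]
    simp [hpr]

lemma B_loop : ∀ (xs p : List String), (p ++ xs).Nodup →
    xs.foldl (fun acc x => PySem.List.insertBy (fun a b => decide (keyB a < keyB b)) x acc) (Tgt p)
      = Tgt (p ++ xs) := by
  intro xs
  induction xs with
  | nil => intro p _; simp
  | cons x xs ih =>
    intro p hnd
    have hx : x ∉ p := fun hm => (List.disjoint_of_nodup_append hnd) hm (by simp)
    rw [List.foldl_cons, ins_step p x hx]
    have : p ++ x :: xs = (p ++ [x]) ++ xs := by simp
    rw [this] at hnd ⊢
    exact ih (p ++ [x]) hnd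

lemma B_char (kexts : List String) :
    sort_kexts_alt kexts = Tgt (PySem.List.dedup kexts) := by
  show PySem.List.sorted (PySem.List.dedup kexts) keyB false = _
  rw [PySem.List.sorted_eq_foldl_insertBy]
  have h0 : Tgt [] = ([] : List String) := by decide
  have := B_loop (PySem.List.dedup kexts) [] (by simp [PySem.List.nodup_dedup])
  rw [h0] at this
  simpa using this

-- ===== VERDICT (by name: the statement is the Claim_ definition above) =====
theorem sort_kexts_spec : Claim_equal_sort_kexts := by
  intro kexts _
  show sort_kexts kexts = sort_kexts_alt kexts
  rw [A_char, B_char]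
  unfold Tgt
  congr 1
  exact List.filter_congr (fun q _ => by simp)
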